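-- pv_equiv track=rewrite | github.com/Ilya626/gigavad | rupunct_apply.py | _find_split_index
-- ===== SOURCE A (Python) =====
-- def _find_split_index(text: str) -> int:
--     """Locate a whitespace character closest to the middle of *text*."""
--     if len(text) < 2:
--         return -1
--     mid = len(text) // 2
--     # try to find whitespace scanning left from the midpoint first, then right
--     for idx in range(mid, 0, -1):
--         if text[idx - 1].isspace():
--             return idx - 1
--     for idx in range(mid, len(text)):
--         if text[idx].isspace():
--             return idx
--     return -1
-- ===== SOURCE B (Python) =====
-- def _find_split_index(text: str) -> int:
--     """Locate a whitespace character closest to the middle of *text*."""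
--     if len(text) < 2:
--         return -1
--     mid = len(text) // 2
--     left = right = -1
--     for i, c in enumerate(text):
--         if c.isspace():
--             if i < mid:
--                 left = i
--             elif right == -1:
--                 right = i
--     return left if left != -1 else right
-- ===== Notes on version B (the rewrite author's own statement) =====
-- stated objective: alternative
-- what changed: Replaces A's two outward scans from the midpoint (downward loop with early return, then upward loop) by a single forward pass over enumerate(text) that maintains two accumulators: the last whitespace index below mid and the first whitespace index at/after mid.
import Mathlib
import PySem

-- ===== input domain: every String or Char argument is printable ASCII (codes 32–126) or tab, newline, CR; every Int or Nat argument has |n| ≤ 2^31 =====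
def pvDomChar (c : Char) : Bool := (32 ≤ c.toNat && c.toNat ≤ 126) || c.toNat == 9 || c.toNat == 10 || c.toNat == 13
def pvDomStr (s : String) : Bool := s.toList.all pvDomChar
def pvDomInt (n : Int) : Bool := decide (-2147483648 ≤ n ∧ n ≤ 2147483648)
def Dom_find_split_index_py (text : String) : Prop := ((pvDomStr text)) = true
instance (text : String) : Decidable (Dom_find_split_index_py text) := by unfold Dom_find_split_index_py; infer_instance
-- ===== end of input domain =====

-- B replaces A's two outward scans from the midpoint by one forward pass keeping two
-- accumulators (last whitespace index below mid, first at/after mid); objective: alternative.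

-- ===== PORT A =====
-- 'for idx in range(mid, 0, -1): if text[idx-1].isspace(): return idx-1'
-- (the index idx-1 is always in range for the lists this is called on, so the .getD ' '
--  default of the exact pyGet? primitive is never consulted)
def fspLoop1 (cs : List Char) : List Int → Option Int
  | [] => none
  | idx :: rest =>
    if PySem.Chars.isspace ((PySem.List.pyGet? cs (idx - 1)).getD ' ') then some (idx - 1)
    else fspLoop1 cs rest

-- 'for idx in range(mid, len(text)): if text[idx].isspace(): return idx'
def fspLoop2 (cs : List Char) : List Int → Option Int
  | [] => none
  | idx :: rest =>
    if PySem.Chars.isspace ((PySem.List.pyGet? cs idx).getD ' ') then some idx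
    else fspLoop2 cs rest

def find_split_index_py (text : String) : Int :=
  let cs := text.toList
  if (cs.length : Int) < 2 then -1
  else
    let mid : Int := PySem.Int.floordiv (cs.length : Int) 2
    match fspLoop1 cs (PySem.List.pyRange mid 0 (-1)) with
    | some r => r
    | none =>
      match fspLoop2 cs (PySem.List.pyRange mid (cs.length : Int) 1) with
      | some r => r
      | none => -1

-- ===== PORT B =====
-- loop body of B: update (left, right) from one (i, c) pair of enumerate(text)
def fspStep (mid : Int) (lr : Int × Int) (ic : Int × Char) : Int × Int :=
  if PySem.Chars.isspace ic.2 then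
    if ic.1 < mid then (ic.1, lr.2)
    else if lr.2 = -1 then (lr.1, ic.1)
    else lr
  else lr

def find_split_index_py_alt (text : String) : Int :=
  let cs := text.toList
  if (cs.length : Int) < 2 then -1
  else
    let mid : Int := PySem.Int.floordiv (cs.length : Int) 2
    let lr := (PySem.List.enumerate cs 0).foldl (fspStep mid) (-1, -1)
    if lr.1 ≠ -1 then lr.1 else lr.2

-- ===== PRECONDITION & SPEC =====
def Spec_find_split_index_py (text : String) (out : Int) : Prop := out = find_split_index_py_alt text
instance (text : String) (out : Int) : Decidable (Spec_find_split_index_py text out) := by unfold Spec_find_split_index_py; infer_instance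

-- ===== CLAIM (what is proved, stated in full; the proofs are below) =====
def Claim_equal_find_split_index_py : Prop := ∀ (text : String), Dom_find_split_index_py text → Spec_find_split_index_py text (find_split_index_py text)

-- ===== LEMMAS AND PROOFS =====

-- canonical forms of the two searches, over List.range
def fspWs (cs : List Char) (k : Nat) : Bool := PySem.Chars.isspace (cs.getD k ' ')

def fspSpecL (cs : List Char) (m : Nat) : Option Int :=
  ((List.range m).find? (fun k => fspWs cs (m - 1 - k))).map (fun k => ((m - 1 - k : Nat) : Int))

def fspSpecR (cs : List Char) (m n : Nat) : Option Int :=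
  ((List.range (n - m)).find? (fun k => fspWs cs (m + k))).map (fun k => ((m + k : Nat) : Int))

-- find? + map congruence on members
theorem fspFindCongr {α β : Type} (l : List α) (p q : α → Bool) (f g : α → β)
    (hpq : ∀ x ∈ l, p x = q x) (hfg : ∀ x ∈ l, p x = true → f x = g x) :
    (l.find? p).map f = (l.find? q).map g := by
  induction l with
  | nil => rfl
  | cons x t ih =>
    have hx := hpq x (List.mem_cons_self)
    by_cases hp : p x = true
    · simp [List.find?_cons, hp, ← hx, hfg x List.mem_cons_self hp]
    · have hp' : p x = false := by simpa using hp
      simp only [List.find?_cons, hp', ← hx]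
      exact ih (fun y hy => hpq y (List.mem_cons_of_mem _ hy))
        (fun y hy h => hfg y (List.mem_cons_of_mem _ hy) h)

theorem fspLoop1_eq_find (cs : List Char) (l : List Int) :
    fspLoop1 cs l
      = (l.find? (fun j => PySem.Chars.isspace ((PySem.List.pyGet? cs (j - 1)).getD ' '))).map (· - 1) := by
  induction l with
  | nil => rfl
  | cons x t ih =>
    simp only [fspLoop1, List.find?_cons]
    split <;> rename_i h
    · simp [h]
    · simp only [Bool.not_eq_true] at h
      simp [h, ih]

theorem fspLoop2_eq_find (cs : List Char) (l : List Int) :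
    fspLoop2 cs l
      = l.find? (fun j => PySem.Chars.isspace ((PySem.List.pyGet? cs j).getD ' ')) := by
  induction l with
  | nil => rfl
  | cons x t ih =>
    simp only [fspLoop2, List.find?_cons]
    split <;> rename_i h
    · simp [h]
    · simp only [Bool.not_eq_true] at h
      simp [h, ih]

theorem fspRangeRev (m : Nat) :
    (List.range m).reverse = (List.range m).map (fun k => m - 1 - k) := by
  rw [List.range_eq_range', List.reverse_range']
  simp [List.range_eq_range']

-- enumerate as a map over List.range
theorem fspEnum (xs : List Char) (s : Int) :
    PySem.List.enumerate xs s
      = (List.range xs.length).map (fun k : Nat => (s + (k : Int), xs.getD k ' ')) := by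
  induction xs generalizing s with
  | nil => simp [PySem.List.enumerate_nil]
  | cons x t ih =>
    rw [PySem.List.enumerate_cons, ih]
    simp only [List.length_cons, List.range_succ_eq_map, List.map_cons, List.map_map]
    refine List.cons_eq_cons.mpr ⟨by simp, ?_⟩
    apply List.map_congr_left
    intro k _
    simp only [Function.comp, Nat.succ_eq_add_one, List.getD_cons_succ, Prod.mk.injEq]
    exact ⟨by push_cast; ring, trivial⟩

-- prefix of the fold: every index < mid, so only 'left' is updated (to the last hit)
theorem fspFoldPrefix (mid : Int) (ps : List (Int × Char)) (l r : Int)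
    (h : ∀ p ∈ ps, p.1 < mid) :
    ps.foldl (fspStep mid) (l, r)
      = (((ps.reverse.find? (fun p => PySem.Chars.isspace p.2)).map Prod.fst).getD l, r) := by
  induction ps generalizing l with
  | nil => rfl
  | cons x t ih =>
    have hx : x.1 < mid := h x List.mem_cons_self
    have ht : ∀ p ∈ t, p.1 < mid := fun p hp => h p (List.mem_cons_of_mem _ hp)
    simp only [List.foldl_cons, List.reverse_cons, List.find?_append]
    by_cases hws : PySem.Chars.isspace x.2 = true
    · rw [show fspStep mid (l, r) x = (x.1, r) by simp [fspStep, hws, hx]]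
      rw [ih x.1 ht]
      cases hf : t.reverse.find? (fun p => PySem.Chars.isspace p.2) with
      | none => simp [List.find?, hws]
      | some p => simp [hf]
    · have hws' : PySem.Chars.isspace x.2 = false := by simpa using hws
      rw [show fspStep mid (l, r) x = (l, r) by simp [fspStep, hws']]
      rw [ih l ht]
      cases hf : t.reverse.find? (fun p => PySem.Chars.isspace p.2) with
      | none => simp [List.find?, hws']
      | some p => simp [hf]

-- suffix of the fold: every index ≥ mid ≥ 0, so only 'right' is set, once
theorem fspFoldSuffix (mid : Int) (ps : List (Int × Char)) (l r : Int)
    (h0 : 0 ≤ mid) (h : ∀ p ∈ ps, mid ≤ p.1) :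
    ps.foldl (fspStep mid) (l, r)
      = (l, if r = -1 then ((ps.find? (fun p => PySem.Chars.isspace p.2)).map Prod.fst).getD (-1) else r) := by
  induction ps generalizing r with
  | nil =>
    simp only [List.foldl_nil, List.find?_nil, Option.map_none, Option.getD_none]
    split <;> simp_all
  | cons x t ih =>
    have hx : mid ≤ x.1 := h x List.mem_cons_self
    have hx' : ¬ x.1 < mid := by omega
    have ht : ∀ p ∈ t, mid ≤ p.1 := fun p hp => h p (List.mem_cons_of_mem _ hp)
    simp only [List.foldl_cons, List.find?_cons]
    by_cases hws : PySem.Chars.isspace x.2 = true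
    · by_cases hr : r = -1
      · rw [show fspStep mid (l, r) x = (l, x.1) by simp [fspStep, hws, hx', hr]]
        rw [ih x.1 ht]
        have : ¬ x.1 = -1 := by omega
        simp [hws, hr, this]
      · rw [show fspStep mid (l, r) x = (l, r) by simp [fspStep, hws, hx', hr]]
        rw [ih r ht]
        simp [hws, hr]
    · have hws' : PySem.Chars.isspace x.2 = false := by simpa using hws
      rw [show fspStep mid (l, r) x = (l, r) by simp [fspStep, hws']]
      rw [ih r ht]
      simp [hws']

-- A's first loop computes fspSpecL
theorem fspA_left (cs : List Char) (m : Nat) (hm : m ≤ cs.length) :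
    fspLoop1 cs (PySem.List.pyRange (m : Int) 0 (-1)) = fspSpecL cs m := by
  rw [fspLoop1_eq_find, PySem.List.pyRange_neg_one]
  have ht : ((m : Int) - 0).toNat = m := by omega
  rw [ht, List.find?_map, Option.map_map, fspSpecL]
  apply fspFindCongr
  · intro k hk
    have hk' : k < m := List.mem_range.mp hk
    have h0 : (0 : Int) ≤ (m : Int) - (k : Int) - 1 := by omega
    have hlt : ((m : Int) - (k : Int) - 1).toNat < cs.length := by omega
    have he : ((m : Int) - (k : Int) - 1).toNat = m - 1 - k := by omega
    simp only [Function.comp]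
    rw [PySem.List.pyGet?_of_nonneg _ h0, List.getElem?_eq_getElem hlt]
    simp [fspWs, List.getD_eq_getElem?_getD, List.getElem?_eq_getElem hlt, he,
      List.getElem?_eq_getElem (show m - 1 - k < cs.length by omega)]
  · intro k hk _
    have hk' : k < m := List.mem_range.mp hk
    simp only [Function.comp]
    omega

-- A's second loop computes fspSpecR
theorem fspA_right (cs : List Char) (m : Nat) (hm : m ≤ cs.length) :
    fspLoop2 cs (PySem.List.pyRange (m : Int) (cs.length : Int) 1) = fspSpecR cs m cs.length := by
  rw [fspLoop2_eq_find, PySem.List.pyRange_one]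
  have ht : ((cs.length : Int) - (m : Int)).toNat = cs.length - m := by omega
  rw [ht, List.find?_map, fspSpecR]
  apply fspFindCongr
  · intro k hk
    have hk' : k < cs.length - m := List.mem_range.mp hk
    have h0 : (0 : Int) ≤ (m : Int) + (k : Int) := by omega
    have hlt : ((m : Int) + (k : Int)).toNat < cs.length := by omega
    have he : ((m : Int) + (k : Int)).toNat = m + k := by omega
    simp only [Function.comp]
    rw [PySem.List.pyGet?_of_nonneg _ h0, List.getElem?_eq_getElem hlt]
    simp [fspWs, List.getD_eq_getElem?_getD, he,
      List.getElem?_eq_getElem (show m + k < cs.length by omega)]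
  · intro k hk _
    omega

-- take-prefix of enumerate, reversed and searched = fspSpecL
theorem fspSL (cs : List Char) (m : Nat) (hm : m ≤ cs.length) :
    (((PySem.List.enumerate (cs.take m) 0).reverse.find? (fun p => PySem.Chars.isspace p.2)).map Prod.fst)
      = fspSpecL cs m := by
  rw [fspEnum, List.length_take, Nat.min_eq_left hm, ← List.map_reverse, fspRangeRev,
    List.map_map, List.find?_map, Option.map_map, fspSpecL]
  apply fspFindCongr
  · intro k hk
    have hk' : k < m := List.mem_range.mp hk
    have h1 : m - 1 - k < m := by omega
    have h2 : m - 1 - k < cs.length := by omega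
    simp only [Function.comp]
    simp [fspWs, List.getD_eq_getElem?_getD, List.getElem?_take, h1,
      List.getElem?_eq_getElem h2]
  · intro k hk _
    simp only [Function.comp]
    omega

-- drop-suffix of enumerate searched = fspSpecR
theorem fspSR (cs : List Char) (m : Nat) (s : Int) (hs : s = (m : Int)) (hm : m ≤ cs.length) :
    (((PySem.List.enumerate (cs.drop m) s).find? (fun p => PySem.Chars.isspace p.2)).map Prod.fst)
      = fspSpecR cs m cs.length := by
  subst hs
  rw [fspEnum, List.length_drop, List.find?_map, Option.map_map, fspSpecR]
  apply fspFindCongr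
  · intro k hk
    have hk' : k < cs.length - m := List.mem_range.mp hk
    have h2 : m + k < cs.length := by omega
    simp only [Function.comp]
    simp [fspWs, List.getD_eq_getElem?_getD, List.getElem?_drop,
      List.getElem?_eq_getElem h2]
  · intro k hk _
    simp only [Function.comp]
    omega

-- B's fold, characterized by the two canonical searches
theorem fspB_fold (cs : List Char) (m : Nat) (hm : m ≤ cs.length) :
    (PySem.List.enumerate cs 0).foldl (fspStep (m : Int)) (-1, -1)
      = ((fspSpecL cs m).getD (-1), (fspSpecR cs m cs.length).getD (-1)) := by
  have hpre : ∀ p ∈ PySem.List.enumerate (cs.take m) 0, p.1 < (m : Int) := by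
    rw [fspEnum]
    intro p hp
    obtain ⟨k, hk, rfl⟩ := List.mem_map.mp hp
    have : k < (cs.take m).length := List.mem_range.mp hk
    rw [List.length_take, Nat.min_eq_left hm] at this
    simp
    omega
  have hsuf : ∀ p ∈ PySem.List.enumerate (cs.drop m) ((0 : Int) + ((cs.take m).length : Nat)),
      (m : Int) ≤ p.1 := by
    rw [fspEnum]
    intro p hp
    obtain ⟨k, hk, rfl⟩ := List.mem_map.mp hp
    simp [List.length_take, Nat.min_eq_left hm]
  conv_lhs => rw [← List.take_append_drop m cs, PySem.List.enumerate_append, List.foldl_append]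
  rw [fspFoldPrefix _ _ _ _ hpre, fspFoldSuffix _ _ _ _ (by omega) hsuf, if_pos rfl]
  rw [fspSL cs m hm, fspSR cs m _ (by simp [List.length_take, Nat.min_eq_left hm]) hm]

theorem fspSpecL_nonneg (cs : List Char) (m : Nat) (v : Int) (h : fspSpecL cs m = some v) : 0 ≤ v := by
  rw [fspSpecL] at h
  obtain ⟨k, _, rfl⟩ := Option.map_eq_some_iff.mp h
  omega

-- ===== VERDICT (by name: the statement is the Claim_ definition above) =====
theorem find_split_index_py_spec : Claim_equal_find_split_index_py := by
  intro text _
  show find_split_index_py text = find_split_index_py_alt text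
  unfold find_split_index_py find_split_index_py_alt
  by_cases h2 : ((text.toList.length : Int) < 2)
  · simp only [h2, if_true]
  · simp only [h2, if_false]
    have hn2 : 2 ≤ text.toList.length := by omega
    set cs := text.toList with hcs
    set m : Nat := cs.length / 2 with hmdef
    have hm : m ≤ cs.length := by omega
    have hmid : PySem.Int.floordiv (cs.length : Int) 2 = (m : Int) := by
      rw [hmdef]
      exact_mod_cast PySem.Int.floordiv_natCast cs.length 2
    rw [hmid, fspA_left cs m hm, fspA_right cs m hm, fspB_fold cs m hm]
    cases hL : fspSpecL cs m with
    | some v =>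
      have := fspSpecL_nonneg cs m v hL
      simp only [Option.getD_some]
      rw [if_pos (by omega)]
    | none =>
      simp only [Option.getD_none]
      rw [if_neg (by omega)]
      cases hR : fspSpecR cs m cs.length with
      | some v => simp
      | none => simp
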